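-- pv_equiv track=rewrite | github.com/aweinstock314/clemency-asm | extra/BitsNBytes.py | EncodeDefconBytes
-- ===== SOURCE A (Python) =====
-- def EncodeDefconBytes(arrDefconBytes):
-- 	res = ''
-- 	buff = ''
-- 	for b in arrDefconBytes:
-- 		buff += '{:09b}'.format(b)
-- 		while len(buff) >= 8:
-- 			res += chr(int(buff[:8], 2))
-- 			buff = buff[8:]
-- 	if len(buff) != 0:
-- 		buff += '0' * (8 - len(buff))
-- 		assert(len(buff) == 8)
-- 		res += chr(int(buff, 2))
-- 	return res
-- ===== SOURCE B (Python) =====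
-- def EncodeDefconBytes(arrDefconBytes):
--     # Build one big integer holding all the bits (MSB-first) by balanced
--     # divide-and-conquer joining, then slice it into bytes in a second pass.
--     if not arrDefconBytes:
--         return ''
--
--     def join(lo, hi):
--         # (value, bit-width) of arrDefconBytes[lo:hi] packed MSB-first
--         if hi - lo == 1:
--             b = arrDefconBytes[lo]
--             return b, max(9, b.bit_length())
--         mid = (lo + hi) // 2
--         v1, n1 = join(lo, mid)
--         v2, n2 = join(mid, hi)
--         return v1 * (1 << n2) + v2, n1 + n2
--
--     acc, total = join(0, len(arrDefconBytes))
--     pad = (-total) % 8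
--     acc = acc * (1 << pad)
--     total = total + pad
--     data = acc.to_bytes(total // 8, 'big')
--     return ''.join(map(chr, data))
-- ===== Notes on version B (the rewrite author's own statement) =====
-- stated objective: alternative
-- what changed: Replaces A's growing '0'/'1' character buffer with repeated string slicing/parsing by one big integer holding all the bits, built by balanced divide-and-conquer joins, then sliced into bytes with int.to_bytes in a second pass.
-- outside the precondition, e.g. on EncodeDefconBytes([-1]): A returns '\x00\x80', B raises OverflowError
import Mathlib
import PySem

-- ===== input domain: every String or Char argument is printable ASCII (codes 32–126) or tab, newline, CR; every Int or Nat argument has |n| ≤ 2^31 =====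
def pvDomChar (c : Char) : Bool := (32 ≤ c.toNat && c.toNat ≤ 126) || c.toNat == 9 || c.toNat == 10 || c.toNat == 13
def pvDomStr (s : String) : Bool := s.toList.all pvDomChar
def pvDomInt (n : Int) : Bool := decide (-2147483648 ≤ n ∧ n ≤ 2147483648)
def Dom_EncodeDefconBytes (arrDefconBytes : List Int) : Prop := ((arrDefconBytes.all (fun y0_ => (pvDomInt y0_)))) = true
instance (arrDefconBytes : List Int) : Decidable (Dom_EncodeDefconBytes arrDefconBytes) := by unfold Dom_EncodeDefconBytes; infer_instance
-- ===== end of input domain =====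

-- B replaces A's '0'/'1' string bit-buffer by a big-integer accumulator with a
-- separate byte-extraction pass (alternative algorithm, same asymptotic cost).


-- ===== PORT A =====

-- hand port of int(s, 2): exact for nonempty strings of '0'/'1' digits (all Pre_ inputs feed only those)
def pvInt2 (cs : List Char) : Int := cs.foldl (fun a c => 2 * a + (if c = '1' then 1 else 0)) 0

-- binary digits of n, MSB first, no leading zeros ('' for 0)
def pvNatBits (n : Nat) : List Char :=
  if h : n = 0 then [] else pvNatBits (n / 2) ++ [if n % 2 = 1 then '1' else '0']
  decreasing_by exact Nat.div_lt_self (Nat.pos_of_ne_zero h) (by norm_num)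

-- hand port of '{:09b}'.format(b): exact for 0 ≤ b (Pre_ guarantees)
def pvFmt9 (b : Int) : List Char :=
  let d := pvNatBits b.toNat
  List.replicate (9 - d.length) '0' ++ d

-- the inner `while len(buff) >= 8` loop of A
def pvWhile (res buff : List Char) : List Char × List Char :=
  if h : 8 ≤ buff.length then
    pvWhile (res ++ [Char.ofNat (pvInt2 (buff.take 8)).toNat]) (buff.drop 8)
  else (res, buff)
  termination_by buff.length
  decreasing_by simp [List.length_drop]; omega

-- the outer `for b in arrDefconBytes` loop, then the final-padding branch of A
def pvALoop : List Int → List Char → List Char → List Char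
  | [], res, buff =>
      if buff.length ≠ 0 then
        res ++ [Char.ofNat (pvInt2 (buff ++ List.replicate (8 - buff.length) '0')).toNat]
      else res
  | b :: rest, res, buff =>
      let p := pvWhile res (buff ++ pvFmt9 b)
      pvALoop rest p.1 p.2

def EncodeDefconBytes (arrDefconBytes : List Int) : String :=
  String.mk (pvALoop arrDefconBytes [] [])

-- ===== PORT B =====

-- (value, bit-width) of a slice, packed MSB-first: B's inner `join(lo, hi)` recursion
-- (Python passes indices lo/hi into the list; the port passes the slice itself)
def pvJoin : List Int → Int × Int
  | [] => (0, 0)  -- unreachable: Python never calls join on an empty slice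
  | [b] => (b, ((max 9 (PySem.Int.bitLength b) : Nat) : Int))
  | x :: y :: rest =>
      let m := (x :: y :: rest).length / 2
      let p1 := pvJoin ((x :: y :: rest).take m)
      let p2 := pvJoin ((x :: y :: rest).drop m)
      (p1.1 * ((1 : Int) <<< p2.2.toNat) + p2.1, p1.2 + p2.2)
  termination_by xs => xs.length
  decreasing_by
  · simp [List.length_take]; omega
  · simp [List.length_drop]; omega

-- hand port of int.to_bytes(k, 'big'): exact for 0 ≤ acc < 256^k (guaranteed inside Pre_)
def pvToBytes : Nat → Int → List Int
  | 0, _ => []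
  | k + 1, acc => pvToBytes k (PySem.Int.floordiv acc 256) ++ [PySem.Int.mod acc 256]

def EncodeDefconBytes_alt (arrDefconBytes : List Int) : String :=
  if arrDefconBytes = [] then ""  -- Python: if not arrDefconBytes: return ''
  else
    let p := pvJoin arrDefconBytes
    let pad : Int := PySem.Int.mod (-p.2) 8
    let acc : Int := p.1 * ((1 : Int) <<< pad.toNat)
    let total : Int := p.2 + pad
    String.mk ((pvToBytes (PySem.Int.floordiv total 8).toNat acc).map
      (fun v => Char.ofNat v.toNat))

-- ===== PRECONDITION & SPEC =====
-- Pre_ excludes lists containing a negative value: '{:09b}' then emits a sign character,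
-- so A raises ValueError on almost all of them, and where the sign happens to align with a
-- chunk boundary the parsed value is an accident of string formatting.
def Pre_EncodeDefconBytes (arrDefconBytes : List Int) : Prop := ∀ b ∈ arrDefconBytes, 0 ≤ b
instance (arrDefconBytes : List Int) : Decidable (Pre_EncodeDefconBytes arrDefconBytes) := by
  unfold Pre_EncodeDefconBytes; infer_instance

def pvWitness_EncodeDefconBytes : List Int := [1, 511, 0, 300]

def Spec_EncodeDefconBytes (arrDefconBytes : List Int) (out : String) : Prop := out = EncodeDefconBytes_alt arrDefconBytes
instance (arrDefconBytes : List Int) (out : String) : Decidable (Spec_EncodeDefconBytes arrDefconBytes out) := by unfold Spec_EncodeDefconBytes; infer_instance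

-- ===== CLAIM (what is proved, stated in full; the proofs are below) =====
def Claim_equal_EncodeDefconBytes : Prop := ∀ (arrDefconBytes : List Int), Dom_EncodeDefconBytes arrDefconBytes → Pre_EncodeDefconBytes arrDefconBytes → Spec_EncodeDefconBytes arrDefconBytes (EncodeDefconBytes arrDefconBytes)

-- ===== LEMMAS AND PROOFS =====

-- the common reference function: chunk a bit-string into bytes, zero-padding the tail
def pvPack (s : List Char) : List Char :=
  if s = [] then []
  else if h : 8 ≤ s.length then
    Char.ofNat (pvInt2 (s.take 8)).toNat :: pvPack (s.drop 8)
  else [Char.ofNat (pvInt2 (s ++ List.replicate (8 - s.length) '0')).toNat]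
  termination_by s.length
  decreasing_by simp [List.length_drop]; omega

theorem pvInt2_foldl (a : Int) (s : List Char) :
    s.foldl (fun a c => 2 * a + (if c = '1' then 1 else 0)) a
      = a * 2 ^ s.length + pvInt2 s := by
  induction s generalizing a with
  | nil => simp [pvInt2]
  | cons c t ih =>
      simp only [List.foldl_cons, List.length_cons, pvInt2] at *
      rw [ih, ih (2 * 0 + _)]
      ring

theorem pvInt2_append (s t : List Char) :
    pvInt2 (s ++ t) = pvInt2 s * 2 ^ t.length + pvInt2 t := by
  simp only [pvInt2, List.foldl_append]
  rw [pvInt2_foldl]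
  rfl

theorem pvInt2_nonneg (s : List Char) : 0 ≤ pvInt2 s := by
  induction s with
  | nil => simp [pvInt2]
  | cons c t ih =>
      show 0 ≤ pvInt2 (c :: t)
      have : pvInt2 (c :: t) = (2 * 0 + (if c = '1' then 1 else 0)) * 2 ^ t.length + pvInt2 t := by
        simpa [pvInt2] using pvInt2_foldl (2 * 0 + (if c = '1' then (1:Int) else 0)) t
      rw [this]
      have : (0:Int) ≤ (if c = '1' then 1 else 0) := by split <;> norm_num
      positivity

theorem pvInt2_lt (s : List Char) : pvInt2 s < 2 ^ s.length := by
  induction s with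
  | nil => simp [pvInt2]
  | cons c t ih =>
      have h : pvInt2 (c :: t) = (2 * 0 + (if c = '1' then 1 else 0)) * 2 ^ t.length + pvInt2 t := by
        simpa [pvInt2] using pvInt2_foldl (2 * 0 + (if c = '1' then (1:Int) else 0)) t
      rw [h]
      have hd : (if c = '1' then (1:Int) else 0) ≤ 1 := by split <;> norm_num
      have h2 : (0:Int) < 2 ^ t.length := by positivity
      calc (2 * 0 + (if c = '1' then (1:Int) else 0)) * 2 ^ t.length + pvInt2 t
          ≤ 1 * 2 ^ t.length + pvInt2 t := by nlinarith
        _ < 2 ^ t.length + 2 ^ t.length := by linarith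
        _ = 2 ^ (c :: t).length := by simp [List.length_cons]; ring

theorem pvInt2_replicate_zero (k : Nat) : pvInt2 (List.replicate k '0') = 0 := by
  induction k with
  | zero => simp [pvInt2]
  | succ n ih =>
      rw [List.replicate_succ, show ('0' :: List.replicate n '0') = ['0'] ++ List.replicate n '0' from rfl,
        pvInt2_append]
      simpa [pvInt2] using ih

theorem pvNatBits_val (n : Nat) : pvInt2 (pvNatBits n) = n := by
  induction n using Nat.strong_induction_on with
  | _ n ih =>
    rw [pvNatBits]
    split
    · simp [pvInt2]; omega
    · rename_i h
      rw [pvInt2_append, ih (n / 2) (Nat.div_lt_self (Nat.pos_of_ne_zero h) (by norm_num))]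
      have : pvInt2 [if n % 2 = 1 then '1' else '0'] = (n % 2 : Nat) := by
        rcases Nat.mod_two_eq_zero_or_one n with h2 | h2 <;> simp [pvInt2, h2]
      rw [this]
      simp only [List.length_singleton, pow_one]
      push_cast
      omega

theorem pvNatBits_length (n : Nat) : (pvNatBits n).length = PySem.Int.bitLength (n : Int) := by
  induction n using Nat.strong_induction_on with
  | _ n ih =>
    rw [pvNatBits]
    split
    · rename_i h; simp [h, PySem.Int.bitLength_zero]
    · rename_i h
      rw [PySem.Int.bitLength_natCast (Nat.pos_of_ne_zero h)]
      simp [ih (n / 2) (Nat.div_lt_self (Nat.pos_of_ne_zero h) (by norm_num))]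

theorem pvFmt9_val (b : Int) (hb : 0 ≤ b) : pvInt2 (pvFmt9 b) = b := by
  simp only [pvFmt9]
  rw [pvInt2_append, pvInt2_replicate_zero, pvNatBits_val]
  simp [Int.toNat_of_nonneg hb]

theorem pvFmt9_length (b : Int) (hb : 0 ≤ b) :
    (pvFmt9 b).length = max 9 (PySem.Int.bitLength b) := by
  simp only [pvFmt9, List.length_append, List.length_replicate]
  rw [pvNatBits_length, Int.toNat_of_nonneg hb]
  omega

theorem pvPack_cons (s : List Char) (h : 8 ≤ s.length) :
    pvPack s = Char.ofNat (pvInt2 (s.take 8)).toNat :: pvPack (s.drop 8) := by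
  have hne : s ≠ [] := by intro hc; subst hc; simp at h
  rw [pvPack]; simp [hne, h]

theorem pvWhile_len (res s : List Char) : (pvWhile res s).2.length < 8 := by
  induction res, s using pvWhile.induct with
  | case1 res s h ih => rw [pvWhile]; simp only [h, dite_true]; exact ih
  | case2 res s h => rw [pvWhile]; simp only [h, dite_false]; omega

-- pvWhile drains complete 8-bit chunks: packing is preserved under any continuation t
theorem pvWhile_pack (res s t : List Char) :
    (pvWhile res s).1 ++ pvPack ((pvWhile res s).2 ++ t) = res ++ pvPack (s ++ t) := by
  induction res, s using pvWhile.induct with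
  | case1 res s h ih =>
      rw [pvWhile]; simp only [h, dite_true]
      rw [ih]
      have h8 : 8 ≤ (s ++ t).length := by simp; omega
      rw [pvPack_cons _ h8, List.take_append_of_le_length h, List.drop_append_of_le_length h]
      simp
  | case2 res s h => rw [pvWhile]; simp only [h, dite_false]

-- A's loop produces exactly the packing of the concatenated bit string
theorem pvALoop_pack (arr : List Int) (res buff : List Char) (hb : buff.length < 8) :
    pvALoop arr res buff = res ++ pvPack (buff ++ arr.flatMap pvFmt9) := by
  induction arr generalizing res buff with
  | nil =>
      simp only [pvALoop, List.flatMap_nil, List.append_nil]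
      by_cases hbe : buff = []
      · subst hbe; simp [pvPack]
      · have hlen : buff.length ≠ 0 := by simpa using hbe
        rw [pvPack]
        simp [hbe, hlen, Nat.not_le.mpr hb]
  | cons b rest ih =>
      simp only [pvALoop]
      rw [ih _ _ (pvWhile_len res (buff ++ pvFmt9 b))]
      have := pvWhile_pack res (buff ++ pvFmt9 b) (rest.flatMap pvFmt9)
      simp only [List.flatMap_cons, List.append_assoc] at *
      rw [this]

-- B's join recursion accumulates the value and bit-length of the concatenated bit string
theorem pvJoin_eq (xs : List Int) (hne : xs ≠ []) (h : ∀ b ∈ xs, 0 ≤ b) :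
    pvJoin xs = (pvInt2 (xs.flatMap pvFmt9), ((xs.flatMap pvFmt9).length : Int)) := by
  induction xs using pvJoin.induct with
  | case1 => exact absurd rfl hne
  | case2 b =>
      have hb : 0 ≤ b := h b (by simp)
      simp only [pvJoin, List.flatMap_cons, List.flatMap_nil, List.append_nil]
      rw [pvFmt9_val b hb, pvFmt9_length b hb]
  | case3 x y rest m ih1 ih2 =>
      have hm : m = (x :: y :: rest).length / 2 := rfl
      have hlen : 2 ≤ (x :: y :: rest).length := by simp
      have hm1 : 1 ≤ m := by omega
      have hm2 : m < (x :: y :: rest).length := by omega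
      have htne : (x :: y :: rest).take m ≠ [] := by
        rw [Ne, List.take_eq_nil_iff]
        push Not
        exact ⟨by omega, by simp⟩
      have hdne : (x :: y :: rest).drop m ≠ [] := by
        rw [Ne, List.drop_eq_nil_iff]
        omega
      have ht : ∀ b ∈ (x :: y :: rest).take m, 0 ≤ b := fun b hb => h b (List.mem_of_mem_take hb)
      have hd : ∀ b ∈ (x :: y :: rest).drop m, 0 ≤ b := fun b hb => h b (List.mem_of_mem_drop hb)
      have hflat : ((x :: y :: rest).take m).flatMap pvFmt9 ++ ((x :: y :: rest).drop m).flatMap pvFmt9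
          = (x :: y :: rest).flatMap pvFmt9 := by
        rw [← List.flatMap_append, List.take_append_drop]
      have htoNat : ((((((x :: y :: rest).drop m).flatMap pvFmt9).length : Int)).toNat)
          = (((x :: y :: rest).drop m).flatMap pvFmt9).length := by omega
      rw [pvJoin]
      simp only [← hm, ih1 htne ht, ih2 hdne hd, Prod.mk.injEq]
      refine ⟨?_, ?_⟩
      · rw [Int.shiftLeft_eq, one_mul, htoNat, ← hflat, pvInt2_append]
      · rw [← hflat, List.length_append]
        omega

-- packing distributes over a byte-aligned split
theorem pvPack_append (s t : List Char) (hdvd : 8 ∣ s.length) :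
    pvPack (s ++ t) = pvPack s ++ pvPack t := by
  induction hn : s.length using Nat.strong_induction_on generalizing s with
  | _ n ih =>
    subst hn
    have hnil : pvPack ([] : List Char) = [] := by rw [pvPack]; simp
    by_cases hbe : s = []
    · subst hbe; simp [hnil]
    · have h8 : 8 ≤ s.length := by
        have : s.length ≠ 0 := by simpa using hbe
        omega
      have h8' : 8 ≤ (s ++ t).length := by simp; omega
      rw [pvPack_cons _ h8', pvPack_cons _ h8,
        List.take_append_of_le_length h8, List.drop_append_of_le_length h8]
      rw [ih (s.drop 8).length (by simp [List.length_drop]; omega) (s.drop 8)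
        (by simp [List.length_drop]; omega) rfl]
      simp

-- B's second pass: the big-endian bytes of an 8k-bit string are its packed bytes
theorem pvToBytes_map_pack (k : Nat) (s : List Char) (hlen : s.length = 8 * k) :
    (pvToBytes k (pvInt2 s)).map (fun v => Char.ofNat v.toNat) = pvPack s := by
  induction k generalizing s with
  | zero =>
      have : s = [] := by
        cases s with
        | nil => rfl
        | cons a t => simp at hlen
      subst this
      simp [pvToBytes, pvPack]
  | succ k ih =>
      have hT : (s.take (8 * k)).length = 8 * k := by simp [List.length_take]; omega
      have hD : (s.drop (8 * k)).length = 8 := by simp [List.length_drop]; omega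
      have hval : pvInt2 s = pvInt2 (s.drop (8 * k)) + pvInt2 (s.take (8 * k)) * 256 := by
        conv_lhs => rw [← List.take_append_drop (8 * k) s]
        rw [pvInt2_append, hD]
        norm_num
        ring
      have hDlt : pvInt2 (s.drop (8 * k)) < 256 := by
        have := pvInt2_lt (s.drop (8 * k))
        rw [hD] at this
        norm_num at this
        exact this
      have hDnn : 0 ≤ pvInt2 (s.drop (8 * k)) := pvInt2_nonneg _
      have hdiv : PySem.Int.floordiv (pvInt2 s) 256 = pvInt2 (s.take (8 * k)) := by
        rw [PySem.Int.floordiv_eq_ediv_of_pos (by norm_num), hval]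
        omega
      have hmod : PySem.Int.mod (pvInt2 s) 256 = pvInt2 (s.drop (8 * k)) := by
        rw [PySem.Int.mod_eq_emod_of_pos (by norm_num), hval]
        omega
      have hpackD : pvPack (s.drop (8 * k)) = [Char.ofNat (pvInt2 (s.drop (8 * k))).toNat] := by
        have e1 : List.take 8 (s.drop (8 * k)) = s.drop (8 * k) :=
          List.take_of_length_le (by rw [hD])
        have e2 : List.drop 8 (s.drop (8 * k)) = [] :=
          List.drop_eq_nil_of_le (by rw [hD])
        rw [pvPack_cons (s.drop (8 * k)) (by rw [hD]), e1, e2]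
        simp [pvPack]
      rw [pvToBytes, List.map_append, hdiv, hmod, ih _ hT]
      conv_rhs => rw [← List.take_append_drop (8 * k) s]
      rw [pvPack_append _ _ (by omega), hpackD]
      simp

-- packing is unchanged by zero-padding the tail up to a byte boundary
theorem pvPack_pad (s : List Char) :
    pvPack (s ++ List.replicate ((8 - s.length % 8) % 8) '0') = pvPack s := by
  induction hn : s.length using Nat.strong_induction_on generalizing s with
  | _ n ih =>
    subst hn
    by_cases hbe : s = []
    · subst hbe; simp
    · by_cases h8 : 8 ≤ s.length
      · have h8' : 8 ≤ (s ++ List.replicate ((8 - s.length % 8) % 8) '0').length := by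
          simp; omega
        rw [pvPack_cons _ h8', pvPack_cons _ h8,
          List.take_append_of_le_length h8, List.drop_append_of_le_length h8]
        have hmod : (8 - (s.drop 8).length % 8) % 8 = (8 - s.length % 8) % 8 := by
          simp [List.length_drop]; omega
        have := ih (s.drop 8).length (by simp [List.length_drop]; omega) (s.drop 8) rfl
        rw [hmod] at this
        rw [this]
      · have hlen : 0 < s.length ∧ s.length < 8 := by
          constructor
          · simpa [List.length_pos_iff] using hbe
          · omega
        have hP : (8 - s.length % 8) % 8 = 8 - s.length := by omega
        rw [hP]
        have hlen8 : (s ++ List.replicate (8 - s.length) '0').length = 8 := by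
          simp; omega
        rw [pvPack_cons _ (by omega), pvPack]
        have htake : (s ++ List.replicate (8 - s.length) '0').take 8
            = s ++ List.replicate (8 - s.length) '0' := by
          apply List.take_of_length_le; omega
        have hdrop : (s ++ List.replicate (8 - s.length) '0').drop 8 = [] := by
          apply List.drop_eq_nil_of_le; omega
        rw [htake, hdrop]
        simp [pvPack, hbe, Nat.not_le.mpr hlen.2]

theorem pvAlt_eq_pack (arr : List Int) (hne : arr ≠ []) (hpre : ∀ b ∈ arr, 0 ≤ b) :
    EncodeDefconBytes_alt arr = String.mk (pvPack (arr.flatMap pvFmt9)) := by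
  unfold EncodeDefconBytes_alt
  rw [if_neg hne, pvJoin_eq arr hne hpre]
  set F := arr.flatMap pvFmt9 with hF
  set L := F.length with hL
  set P : Nat := (8 - L % 8) % 8 with hP
  have hpad : PySem.Int.mod (-(L : Int)) 8 = (P : Int) := by
    rw [PySem.Int.mod_eq_emod_of_pos (by norm_num)]
    omega
  simp only [hpad]
  have hptn : ((P : Int)).toNat = P := by omega
  have hacc : pvInt2 F * ((1 : Int) <<< ((P : Int)).toNat)
      = pvInt2 (F ++ List.replicate P '0') := by
    rw [Int.shiftLeft_eq, one_mul, hptn, pvInt2_append, pvInt2_replicate_zero]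
    simp
  rw [hacc]
  have hdvd : 8 ∣ L + P := by omega
  set k : Nat := (L + P) / 8 with hk
  have hlen8 : (F ++ List.replicate P '0').length = 8 * k := by
    simp only [List.length_append, List.length_replicate, ← hL]
    omega
  have htot : PySem.Int.floordiv ((L : Int) + (P : Int)) 8 = (k : Int) := by
    rw [PySem.Int.floordiv_eq_ediv_of_pos (by norm_num)]
    omega
  rw [htot, show ((k : Int)).toNat = k by omega,
    pvToBytes_map_pack k _ hlen8, pvPack_pad]

-- ===== VERDICT (by name: the statement is the Claim_ definition above) =====
theorem EncodeDefconBytes_spec : Claim_equal_EncodeDefconBytes := by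
  intro arr _ hpre
  show EncodeDefconBytes arr = EncodeDefconBytes_alt arr
  by_cases hne : arr = []
  · subst hne; decide
  · rw [EncodeDefconBytes, pvALoop_pack arr [] [] (by simp), pvAlt_eq_pack arr hne hpre]
    simp
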